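-- pv_equiv track=rewrite | github.com/anthonywritescode/aoc2025 | day03/part1.py | compute
-- ===== SOURCE A (Python) =====
-- def compute(s: str) -> int:
--     total = 0
--     for line in s.splitlines():
--         d1 = max(line)
--         idx = line.index(d1)
--         if idx == len(line) - 1:
--             d1, d2 = max(line[:-1]), d1
--         else:
--             d2 = max(line[line.index(d1) + 1:])
--         total += int(d1 + d2)
--     return total
-- ===== SOURCE B (Python) =====
-- def compute(s: str) -> int:
--     total = 0
--     for line in s.splitlines():
--         best = max(
--             line[i] + line[j]
--             for i in range(len(line))
--             for j in range(i + 1, len(line))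
--         )
--         total += int(best)
--     return total
-- ===== Notes on version B (the rewrite author's own statement) =====
-- stated objective: idiomatic
-- what changed: A's three-step greedy (global max char, first-index test, conditional re-max over a prefix or suffix) is replaced by a single max() over all ordered two-character subsequences line[i]+line[j], compared as strings, with int() applied only to the winner.
import Mathlib
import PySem

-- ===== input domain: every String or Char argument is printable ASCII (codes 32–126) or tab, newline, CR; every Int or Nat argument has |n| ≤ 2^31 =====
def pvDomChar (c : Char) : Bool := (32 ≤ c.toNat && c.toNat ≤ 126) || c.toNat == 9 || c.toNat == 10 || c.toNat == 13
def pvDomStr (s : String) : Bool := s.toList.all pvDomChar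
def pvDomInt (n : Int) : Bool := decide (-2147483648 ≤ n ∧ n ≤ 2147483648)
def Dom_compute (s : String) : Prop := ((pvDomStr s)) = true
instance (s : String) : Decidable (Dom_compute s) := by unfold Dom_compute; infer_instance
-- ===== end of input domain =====

-- B replaces A's greedy scan (max char, first index, conditional re-max over prefix/suffix) by one
-- max() over all ordered two-character subsequences of each line, compared as strings (idiomatic, not faster).


-- ===== PORT A =====
-- one iteration of A's loop body on one line (as a list of chars); defaults are only
-- reached where the Python raises (excluded by Pre_)
def computeLineA (l : List Char) : Int :=
  let d1 := (PySem.List.max? l (fun c => c)).getD ' '                    -- d1 = max(line)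
  let idx := (PySem.List.index? l d1).getD 0                             -- idx = line.index(d1)
  let p : Char × Char :=
    if (idx : Int) = PySem.List.len l - 1 then
      ((PySem.List.max? (PySem.List.slice l none (some (-1))) (fun c => c)).getD ' ', d1)
    else
      (d1, (PySem.List.max? (PySem.List.slice l (some ((((PySem.List.index? l d1).getD 0 : Nat) : Int) + 1)) none) (fun c => c)).getD ' ')
  (PySem.Int.ofChars? [p.1, p.2]).getD 0                                 -- int(d1 + d2)

def compute (s : String) : Int :=
  (PySem.Str.splitlines s).foldl (fun total line => total + computeLineA line.toList) 0

-- ===== PORT B =====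
-- the generator: all two-char subsequences line[i] + line[j], i < j
def candsB (l : List Char) : List (List Char) :=
  (PySem.List.pyRange 0 (PySem.List.len l) 1).flatMap (fun i =>
    (PySem.List.pyRange (i + 1) (PySem.List.len l) 1).map (fun j =>
      [PySem.List.pyGetD l i ' ', PySem.List.pyGetD l j ' ']))

-- one iteration of B's loop body: best = max(generator); int(best)
def computeLineB (l : List Char) : Int :=
  (PySem.Int.ofChars? ((PySem.List.max? (candsB l) (fun cs => cs)).getD [])).getD 0

def compute_alt (s : String) : Int :=
  (PySem.Str.splitlines s).foldl (fun total line => total + computeLineB line.toList) 0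

-- ===== PRECONDITION & SPEC =====
-- Pre_ excludes exactly the inputs on which the Python A (and B) raise ValueError: a line with
-- fewer than 2 characters, or a line whose lexicographically greatest two-character subsequence
-- [l[i], l[j]] (i < j) is not an int literal (int() rejects it).
def Pre_compute (s : String) : Prop :=
  ∀ line ∈ PySem.Str.splitlines s,
    2 ≤ line.toList.length ∧
    ∃ i ∈ List.range line.toList.length, ∃ j ∈ List.range line.toList.length, i < j ∧
      (PySem.Int.ofChars? [line.toList.getD i ' ', line.toList.getD j ' ']).isSome = true ∧
      ∀ i' ∈ List.range line.toList.length, ∀ j' ∈ List.range line.toList.length, i' < j' →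
        [line.toList.getD i' ' ', line.toList.getD j' ' '] ≤ [line.toList.getD i ' ', line.toList.getD j ' ']
instance (s : String) : Decidable (Pre_compute s) := by unfold Pre_compute; infer_instance

def pvWitness_compute : String := "987\n215"

def Spec_compute (s : String) (out : Int) : Prop := out = compute_alt s
instance (s : String) (out : Int) : Decidable (Spec_compute s out) := by unfold Spec_compute; infer_instance

-- ===== CLAIM (what is proved, stated in full; the proofs are below) =====
def Claim_equal_compute : Prop := ∀ (s : String), Dom_compute s → Pre_compute s → Spec_compute s (compute s)

-- ===== LEMMAS AND PROOFS =====

-- lexicographic comparison of two-char strings, spelled out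
theorem pair_le_iff (a b c d : Char) : ([a,b] : List Char) ≤ [c,d] ↔ a < c ∨ (a = c ∧ b ≤ d) := by
  rw [le_iff_lt_or_eq]
  simp only [List.cons_lt_cons_iff, List.cons.injEq, and_true, List.lt_irrefl]
  constructor
  · rintro ((h|⟨rfl,h⟩)|⟨rfl,rfl⟩)
    · exact Or.inl h
    · exact Or.inr ⟨rfl, le_of_lt (by simpa using h)⟩
    · exact Or.inr ⟨rfl, le_rfl⟩
  · rintro (h|⟨rfl,h⟩)
    · exact Or.inl (Or.inl h)
    · rcases lt_or_eq_of_le h with h|rfl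
      · exact Or.inl (Or.inr ⟨rfl, by simp [h]⟩)
      · exact Or.inr ⟨rfl, rfl⟩

-- what the generator contains: exactly the pairs [l[i], l[j]] with i < j < l.length
theorem mem_candsB (l : List Char) (c : List Char) :
    c ∈ candsB l ↔ ∃ i j : Nat, i < j ∧ j < l.length ∧ c = [l.getD i ' ', l.getD j ' '] := by
  unfold candsB
  simp only [List.mem_flatMap, List.mem_map, PySem.List.mem_pyRange_one, PySem.List.len_eq]
  constructor
  · rintro ⟨i, ⟨hi0, hilen⟩, j, ⟨hij, hjlen⟩, rfl⟩
    refine ⟨i.toNat, j.toNat, by omega, by omega, ?_⟩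
    rw [PySem.List.pyGetD_eq_getElem l ' ' hi0 hilen,
       PySem.List.pyGetD_eq_getElem l ' ' (by omega) hjlen,
       List.getD_eq_getElem l ' ' (show i.toNat < l.length by omega),
       List.getD_eq_getElem l ' ' (show j.toNat < l.length by omega)]
  · rintro ⟨i, j, hij, hjlen, rfl⟩
    exact ⟨(i : Int), ⟨by omega, by omega⟩, (j : Int), ⟨by omega, by omega⟩,
      by simp [PySem.List.pyGetD_natCast]⟩

-- Python's max of a nonempty list whose maximum we can name
theorem max?_getD_eq (xs : List (List Char)) (m d : List Char)
    (hm : m ∈ xs) (hmax : ∀ y ∈ xs, y ≤ m) :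
    (PySem.List.max? xs (fun x => x)).getD d = m := by
  cases hmx : PySem.List.max? xs (fun x => x) with
  | none => rw [PySem.List.max?_eq_none_iff] at hmx; subst hmx; cases hm
  | some m' =>
    have h1 := PySem.List.max?_isMax (κ := List Char) (m := m') (by convert hmx using 2) m hm
    have h2 := hmax m' (PySem.List.max?_mem hmx)
    simpa using le_antisymm h2 h1

-- the heart: A's greedily chosen pair is the maximum two-char subsequence
theorem lineA_eq_lineB (l : List Char) (h2 : 2 ≤ l.length) :
    computeLineA l = computeLineB l := by
  have hne : l ≠ [] := by intro h; subst h; simp at h2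
  obtain ⟨d1, hd1⟩ : ∃ d1, PySem.List.max? l (fun c => c) = some d1 := by
    cases hmx : PySem.List.max? l (fun c => c) with
    | none => rw [PySem.List.max?_eq_none_iff] at hmx; exact absurd hmx hne
    | some m => exact ⟨m, rfl⟩
  have hd1mem : d1 ∈ l := PySem.List.max?_mem hd1
  have hd1max : ∀ y ∈ l, y ≤ d1 := PySem.List.max?_isMax hd1
  obtain ⟨k, hk⟩ : ∃ k, PySem.List.index? l d1 = some k := by
    have := PySem.List.index?_isSome_iff (xs := l) (v := d1)
    rcases h : PySem.List.index? l d1 with _ | k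
    · rw [h] at this; simp [hd1mem] at this
    · exact ⟨k, rfl⟩
  obtain ⟨hklen, hlk, hkfirst⟩ := PySem.List.getElem_of_index?_eq_some hk
  simp only [computeLineA, computeLineB, hd1, hk, Option.getD_some, PySem.List.len_eq]
  by_cases hcase : ((k : Nat) : Int) = (l.length : Int) - 1
  · -- d1 is the (only occurrence of the) max char, at the last position
    have hkeq : k = l.length - 1 := by omega
    rw [if_pos hcase, PySem.List.slice_to_neg_one]
    have hdne : l.dropLast ≠ [] := by
      intro h
      have := List.length_dropLast (xs := l)
      rw [h] at this; simp at this; omega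
    obtain ⟨d1', hd1'⟩ : ∃ d1', PySem.List.max? l.dropLast (fun c => c) = some d1' := by
      cases hmx : PySem.List.max? l.dropLast (fun c => c) with
      | none => rw [PySem.List.max?_eq_none_iff] at hmx; exact absurd hmx hdne
      | some m => exact ⟨m, rfl⟩
    have hd1'mem : d1' ∈ l.dropLast := PySem.List.max?_mem hd1'
    have hd1'max : ∀ y ∈ l.dropLast, y ≤ d1' := PySem.List.max?_isMax hd1'
    rw [hd1', Option.getD_some]
    have hbest : (PySem.List.max? (candsB l) (fun cs => cs)).getD [] = [d1', d1] := by
      apply max?_getD_eq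
      · -- membership: indices (i, l.length - 1)
        obtain ⟨i, hi, hli⟩ := List.getElem_of_mem hd1'mem
        rw [List.getElem_dropLast] at hli
        rw [List.length_dropLast] at hi
        rw [mem_candsB]
        refine ⟨i, k, by omega, by omega, ?_⟩
        rw [List.getD_eq_getElem l ' ' (show i < l.length by omega),
            List.getD_eq_getElem l ' ' (show k < l.length by omega)]
        rw [hli, hlk]
      · intro y hy
        rw [mem_candsB] at hy
        obtain ⟨i, j, hij, hj, rfl⟩ := hy
        rw [List.getD_eq_getElem l ' ' (show i < l.length by omega),
            List.getD_eq_getElem l ' ' hj]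
        rw [pair_le_iff]
        have hiLast : l[i] ∈ l.dropLast := by
          have hi' : i < l.dropLast.length := by rw [List.length_dropLast]; omega
          have hmem := List.getElem_mem hi'
          rw [List.getElem_dropLast] at hmem
          exact hmem
        rcases lt_or_eq_of_le (hd1'max _ hiLast) with h | h
        · exact Or.inl h
        · exact Or.inr ⟨h, hd1max _ (List.getElem_mem hj)⟩
    rw [hbest]
  · -- d1 occurs before the last position; d2 = max of the suffix after its first occurrence
    rw [if_neg hcase]
    have hklt : k < l.length - 1 := by omega
    rw [PySem.List.slice_from l (by omega : (0:Int) ≤ (k : Int) + 1)]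
    have htoNat : ((k : Int) + 1).toNat = k + 1 := by omega
    rw [htoNat]
    have hdne : l.drop (k+1) ≠ [] := by
      intro h
      have : (l.drop (k+1)).length = l.length - (k+1) := List.length_drop ..
      rw [h] at this; simp at this; omega
    obtain ⟨d2, hd2⟩ : ∃ d2, PySem.List.max? (l.drop (k+1)) (fun c => c) = some d2 := by
      cases hmx : PySem.List.max? (l.drop (k+1)) (fun c => c) with
      | none => rw [PySem.List.max?_eq_none_iff] at hmx; exact absurd hmx hdne
      | some m => exact ⟨m, rfl⟩
    have hd2mem : d2 ∈ l.drop (k+1) := PySem.List.max?_mem hd2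
    have hd2max : ∀ y ∈ l.drop (k+1), y ≤ d2 := PySem.List.max?_isMax hd2
    rw [hd2, Option.getD_some]
    have hbest : (PySem.List.max? (candsB l) (fun cs => cs)).getD [] = [d1, d2] := by
      apply max?_getD_eq
      · obtain ⟨t, ht, hlt⟩ := List.getElem_of_mem hd2mem
        rw [List.getElem_drop] at hlt
        rw [List.length_drop] at ht
        rw [mem_candsB]
        refine ⟨k, k + 1 + t, by omega, by omega, ?_⟩
        rw [List.getD_eq_getElem l ' ' (show k < l.length by omega),
            List.getD_eq_getElem l ' ' (show k + 1 + t < l.length by omega)]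
        rw [hlk, hlt]
      · intro y hy
        rw [mem_candsB] at hy
        obtain ⟨i, j, hij, hj, rfl⟩ := hy
        rw [List.getD_eq_getElem l ' ' (show i < l.length by omega),
            List.getD_eq_getElem l ' ' hj]
        rw [pair_le_iff]
        rcases lt_or_eq_of_le (hd1max _ (List.getElem_mem (show i < l.length by omega))) with h | h
        · exact Or.inl h
        · refine Or.inr ⟨h, ?_⟩
          have hik : k ≤ i := by
            by_contra hik
            exact hkfirst i (by omega) h
          have hjmem : l[j] ∈ l.drop (k+1) := by
            rw [List.mem_iff_getElem]
            refine ⟨j - (k+1), by rw [List.length_drop]; omega, ?_⟩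
            rw [List.getElem_drop]
            congr 1
            omega
          exact hd2max _ hjmem
    rw [hbest]

-- ===== VERDICT (by name: the statement is the Claim_ definition above) =====
theorem compute_spec : Claim_equal_compute := by
  intro s _ hpre
  unfold Spec_compute compute compute_alt
  apply PySem.List.foldl_congr_mem
  intro total line hline
  rw [lineA_eq_lineB line.toList (hpre line hline).1]
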